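-- pv_equiv track=rewrite | github.com/hallgrimur1471/programming | emulate_recursion.py | partitions_non_recursive
-- ===== SOURCE A (Python) =====
-- def partitions_non_recursive(x, m):
--     stack = []
--     stack.append( (x, m) )
--
--     return_stack = [[]]
--
--     while stack:
--         x, m = stack.pop()
--
--         if m == 0:
--             return_stack += [x]
--             continue;
--         for i in range(0, len(x)):
--             stack.append( (x[0:i] + [x[i]+1] + x[i+1:], m-1) )
--     return list(filter(None, return_stack))
-- ===== SOURCE B (Python) =====
-- def partitions_non_recursive(x, m):
--     def rec(x, m):
--         if m == 0:
--             return [x]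
--         out = []
--         for i in range(len(x) - 1, -1, -1):
--             out += rec(x[:i] + [x[i] + 1] + x[i + 1:], m - 1)
--         return out
--     return [p for p in rec(x, m) if p]
-- ===== Notes on version B (the rewrite author's own statement) =====
-- stated objective: simpler
-- what changed: Replaces A's explicit LIFO stack and while-loop with a direct recursive helper (reverse-order position loop), keeping the final filter of empty lists.
import Mathlib
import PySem

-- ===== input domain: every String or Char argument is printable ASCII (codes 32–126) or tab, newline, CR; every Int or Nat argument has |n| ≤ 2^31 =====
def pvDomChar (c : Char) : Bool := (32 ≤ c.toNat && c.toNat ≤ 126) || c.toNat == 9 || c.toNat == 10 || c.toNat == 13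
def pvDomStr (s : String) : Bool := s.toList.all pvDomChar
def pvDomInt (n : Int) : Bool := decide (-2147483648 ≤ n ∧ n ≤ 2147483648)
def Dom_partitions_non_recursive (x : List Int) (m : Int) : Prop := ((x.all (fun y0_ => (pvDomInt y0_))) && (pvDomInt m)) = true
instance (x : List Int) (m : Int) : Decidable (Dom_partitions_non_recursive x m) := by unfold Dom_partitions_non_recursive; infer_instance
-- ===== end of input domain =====

-- B replaces A's explicit LIFO stack loop by direct structural recursion on m (simpler decomposition, same output order).

-- ===== PORT A =====
-- x[0:i] + [x[i]+1] + x[i+1:] for 0 ≤ i < len x: exact as take/getD/drop on that range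
def pvChild (x : List Int) (i : Nat) : List Int := x.take i ++ [x.getD i 0 + 1] ++ x.drop (i + 1)

-- fuel bound: number of loop iterations when m ≥ 0 (totality guard only; Python A loops forever for m < 0 with x ≠ [])
def pvCnt (n : Nat) : Nat → Nat
  | 0 => 1
  | k + 1 => 1 + n * pvCnt n k

-- the while loop; stack head = top, pushing i = 0 .. len-1 makes the reversed range the new top segment
def pvLoopA : Nat → List (List Int × Int) → List (List Int) → List (List Int)
  | 0, _, acc => acc
  | _ + 1, [], acc => acc
  | f + 1, (x, m) :: rest, acc =>
    if m = 0 then pvLoopA f rest (acc ++ [x])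
    else pvLoopA f (((List.range x.length).reverse.map (fun i => (pvChild x i, m - 1))) ++ rest) acc

def partitions_non_recursive (x : List Int) (m : Int) : List (List Int) :=
  (pvLoopA (pvCnt x.length m.toNat) [(x, m)] [[]]).filter (fun p => !p.isEmpty)

-- ===== PORT B =====
-- 'if m < 0 then []' is a totality guard: Python B raises RecursionError there for x ≠ [] (outside Pre_)
-- and returns [] for x = [], which this branch reproduces.
def pvRecB (x : List Int) (m : Int) : List (List Int) :=
  if m = 0 then [x]
  else if m < 0 then []
  else (List.range x.length).reverse.flatMap (fun i => pvRecB (pvChild x i) (m - 1))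
termination_by m.toNat
decreasing_by omega

def partitions_non_recursive_alt (x : List Int) (m : Int) : List (List Int) :=
  (pvRecB x m).filter (fun p => !p.isEmpty)

-- ===== PRECONDITION & SPEC =====
-- Pre_ excludes only the inputs on which A never returns (m < 0 with non-empty x: the loop runs forever).
def Pre_partitions_non_recursive (x : List Int) (m : Int) : Prop := 0 ≤ m ∨ x = []
instance (x : List Int) (m : Int) : Decidable (Pre_partitions_non_recursive x m) := by unfold Pre_partitions_non_recursive; infer_instance
def pvWitness_partitions_non_recursive : List Int × Int := ([0, 1], 2)

def Spec_partitions_non_recursive (x : List Int) (m : Int) (out : List (List Int)) : Prop := out = partitions_non_recursive_alt x m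
instance (x : List Int) (m : Int) (out : List (List Int)) : Decidable (Spec_partitions_non_recursive x m out) := by unfold Spec_partitions_non_recursive; infer_instance

-- ===== CLAIM (what is proved, stated in full; the proofs are below) =====
def Claim_equal_partitions_non_recursive : Prop := ∀ (x : List Int) (m : Int), Dom_partitions_non_recursive x m → Pre_partitions_non_recursive x m → Spec_partitions_non_recursive x m (partitions_non_recursive x m)

-- ===== LEMMAS AND PROOFS =====

def pvSumCnt (L : List (List Int × Int)) : Nat := (L.map (fun e => pvCnt e.1.length e.2.toNat)).sum

lemma pvLoopA_run (k : Nat) : ∀ (L rest : List (List Int × Int)) (acc : List (List Int)) (f : Nat),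
    (∀ e ∈ L, e.2 = (k : Int)) →
    pvLoopA (pvSumCnt L + f) (L ++ rest) acc = pvLoopA f rest (acc ++ L.flatMap (fun e => pvRecB e.1 e.2)) := by
  induction k with
  | zero =>
    intro L
    induction L with
    | nil => intro rest acc f _; simp [pvSumCnt]
    | cons e L' ih =>
      intro rest acc f h
      obtain ⟨x, m⟩ := e
      have hm : m = ((0 : Nat) : Int) := h (x, m) (by simp)
      subst hm
      have hstep : pvSumCnt (((x, ((0 : Nat) : Int))) :: L') + f = (pvSumCnt L' + f) + 1 := by
        simp [pvSumCnt, pvCnt]; ring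
      rw [hstep]
      show pvLoopA ((pvSumCnt L' + f) + 1) ((x, ((0 : Nat) : Int)) :: (L' ++ rest)) acc = _
      simp only [pvLoopA, Nat.cast_zero]
      rw [ih rest (acc ++ [x]) f (fun e he => h e (List.mem_cons_of_mem _ he))]
      have hx0 : pvRecB x (0 : Int) = [x] := by rw [pvRecB]; simp
      simp [List.flatMap_cons, hx0, List.append_assoc]
  | succ j ihk =>
    intro L
    induction L with
    | nil => intro rest acc f _; simp [pvSumCnt]
    | cons e L' ih =>
      intro rest acc f h
      obtain ⟨x, m⟩ := e
      have hm : m = ((j + 1 : Nat) : Int) := h (x, m) (by simp)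
      subst hm
      set C : List (List Int × Int) :=
        (List.range x.length).reverse.map (fun i => (pvChild x i, ((j + 1 : Nat) : Int) - 1)) with hCdef
      have hchildlen : ∀ i, i < x.length → (pvChild x i).length = x.length := by
        intro i hi
        simp [pvChild]
        omega
      have hCsum : pvSumCnt C = x.length * pvCnt x.length j := by
        rw [hCdef]
        unfold pvSumCnt
        rw [List.map_map]
        have : ((List.range x.length).reverse.map
            ((fun e : List Int × Int => pvCnt e.1.length e.2.toNat) ∘
              (fun i => (pvChild x i, ((j + 1 : Nat) : Int) - 1)))) =
            (List.range x.length).reverse.map (fun _ => pvCnt x.length j) := by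
          apply List.map_congr_left
          intro i hi
          have hi' : i < x.length := by simpa using hi
          have h1 : (((j + 1 : Nat) : Int) - 1).toNat = j := by omega
          simp [hchildlen i hi']
        rw [this, List.map_const', List.sum_replicate]
        simp
      have hstep : pvSumCnt (((x, ((j + 1 : Nat) : Int))) :: L') + f
          = (pvSumCnt C + (pvSumCnt L' + f)) + 1 := by
        have h1 : pvSumCnt (((x, ((j + 1 : Nat) : Int))) :: L')
            = pvCnt x.length (j + 1) + pvSumCnt L' := by
          simp [pvSumCnt]
        rw [h1, hCsum, pvCnt]
        ring
      rw [hstep]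
      have hne : ((j + 1 : Nat) : Int) ≠ 0 := by
        push_cast; omega
      show pvLoopA ((pvSumCnt C + (pvSumCnt L' + f)) + 1) ((x, ((j + 1 : Nat) : Int)) :: (L' ++ rest)) acc = _
      simp only [pvLoopA, if_neg hne, ← hCdef]
      rw [ihk C (L' ++ rest) acc (pvSumCnt L' + f)
        (by intro e he
            rw [hCdef] at he
            simp only [List.mem_map] at he
            obtain ⟨i, _, rfl⟩ := he
            push_cast
            ring)]
      rw [ih rest (acc ++ C.flatMap (fun e => pvRecB e.1 e.2)) f
        (fun e he => h e (List.mem_cons_of_mem _ he))]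
      have hrec : C.flatMap (fun e => pvRecB e.1 e.2) = pvRecB x ((j + 1 : Nat) : Int) := by
        rw [hCdef, List.flatMap_map]
        rw [pvRecB]
        rw [if_neg hne, if_neg (by push_cast; omega)]
      rw [hrec]
      simp only [List.flatMap_cons, List.append_assoc]

theorem partitions_non_recursive_spec : Claim_equal_partitions_non_recursive := by
  intro x m _ hpre
  unfold Spec_partitions_non_recursive partitions_non_recursive partitions_non_recursive_alt
  by_cases hm : 0 ≤ m
  · have hmk : m = (m.toNat : Int) := (Int.toNat_of_nonneg hm).symm
    have h := pvLoopA_run m.toNat [(x, m)] [] [[]] 0 (by intro e he; simp only [List.mem_singleton] at he; subst he; exact hmk)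
    have hs : pvSumCnt [(x, m)] = pvCnt x.length m.toNat := by simp [pvSumCnt]
    rw [hs] at h
    simp [pvLoopA] at h
    rw [h]
    simp
  · have hx : x = [] := by cases hpre with
      | inl h => exact absurd h hm
      | inr h => exact h
    have hne : m ≠ 0 := by omega
    have hnt : m.toNat = 0 := by omega
    subst hx
    simp [hnt, pvCnt, pvLoopA, hne, pvRecB, show m < 0 by omega]
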